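-- pv_equiv track=rewrite | github.com/Clockmender/My-AN-Nodes | nodes/daw/daw_functions.py | getChordInd
-- ===== SOURCE A (Python) =====
-- noteList = [
--     'c0','cs0','d0','ds0','e0','f0','fs0','g0','gs0','a0','as0','b0',
--     'c1','cs1','d1','ds1','e1','f1','fs1','g1','gs1','a1','as1','b1',
--     'c2','cs2','d2','ds2','e2','f2','fs2','g2','gs2','a2','as2','b2',
--     'c3','cs3','d3','ds3','e3','f3','fs3','g3','gs3','a3','as3','b3',
--     'c4','cs4','d4','ds4','e4','f4','fs4','g4','gs4','a4','as4','b4',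
--     'c5','cs5','d5','ds5','e5','f5','fs5','g5','gs5','a5','as5','b5',
--     'c6','cs6','d6','ds6','e6','f6','fs6','g6','gs6','a6','as6','b6',
--     'c7','cs7','d7','ds7','e7','f7','fs7','g7','gs7','a7','as7','b7',
--     'c8','cs8','d8','ds8','e8','f8','fs8','g8','gs8','a8','as8','b8',
--     'c9','cs9','d9','ds9','e9','f9','fs9','g9','gs9','a9','as9','b9',
--     'c10','cs10','d10','ds10','e10','f10','fs10','g10','gs10','a10','as10','b10',
--     ]
--
-- def getChordInd(noteName,mode):
--     idx = next((i for i, x in enumerate(noteList) if x == noteName), -1)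
--     freqList = []
--     if len(noteName) >= 2 and noteName[1] == 's':
--         if mode == 3:
--             freqList = [idx,idx+5,idx+8]
--         elif mode == 4:
--             freqList = [idx,idx+5,idx+8,idx+11]
--         elif mode == 5:
--             freqList = [idx,idx+5,idx+8,idx+11,idx+12]
--     else:
--         if mode == 3:
--             freqList = [idx,idx+4,idx+7]
--         elif mode == 4:
--             freqList = [idx,idx+4,idx+7,idx+11]
--         elif mode == 5:
--             freqList = [idx,idx+4,idx+7,idx+11,idx+12]
--     return freqList
-- ===== SOURCE B (Python) =====
-- # Closed-form pitch arithmetic: idx computed from letter/accidental/octave instead of scanning the 132-entry table.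
-- _BASE = {'c': 0, 'd': 2, 'e': 4, 'f': 5, 'g': 7, 'a': 9, 'b': 11}
-- _OCTS = {str(o): o for o in range(11)}
--
-- def _noteIndex(noteName, sharp):
--     if not noteName:
--         return -1
--     b = _BASE.get(noteName[0])
--     if b is None or (sharp and noteName[0] not in 'cdfga'):
--         return -1
--     o = _OCTS.get(noteName[2:] if sharp else noteName[1:])
--     if o is None:
--         return -1
--     return 12 * o + b + (1 if sharp else 0)
--
-- def getChordInd(noteName, mode):
--     if mode != 3 and mode != 4 and mode != 5:
--         return []
--     sharp = len(noteName) >= 2 and noteName[1] == 's'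
--     step = 5 if sharp else 4
--     idx = _noteIndex(noteName, sharp)
--     chord = [idx, idx + step, idx + step + 3]
--     if mode >= 4:
--         chord.append(idx + 11)
--     if mode == 5:
--         chord.append(idx + 12)
--     return chord
-- ===== Notes on version B (the rewrite author's own statement) =====
-- stated objective: alternative
-- what changed: B computes the note index by closed-form pitch arithmetic (letter semitone + accidental + 12*octave, parsed from the name) instead of A's linear scan of the 132-entry noteList, and builds the chord incrementally from the interval step instead of six literal lists.
import Mathlib
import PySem

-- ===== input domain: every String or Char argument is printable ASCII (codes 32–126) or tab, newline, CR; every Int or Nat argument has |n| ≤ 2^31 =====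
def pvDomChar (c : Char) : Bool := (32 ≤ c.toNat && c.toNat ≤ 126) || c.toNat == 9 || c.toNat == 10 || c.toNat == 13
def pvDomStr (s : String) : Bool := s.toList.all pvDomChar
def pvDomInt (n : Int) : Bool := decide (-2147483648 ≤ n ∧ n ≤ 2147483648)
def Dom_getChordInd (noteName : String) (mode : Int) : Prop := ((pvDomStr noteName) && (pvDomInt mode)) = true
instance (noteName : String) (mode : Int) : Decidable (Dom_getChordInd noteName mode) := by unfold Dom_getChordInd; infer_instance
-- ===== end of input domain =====

-- B computes the note index by closed-form pitch arithmetic (letter/accidental/octave) instead of scanning the 132-entry table; return value only.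

def noteList : List String := [
    "c0","cs0","d0","ds0","e0","f0","fs0","g0","gs0","a0","as0","b0",
    "c1","cs1","d1","ds1","e1","f1","fs1","g1","gs1","a1","as1","b1",
    "c2","cs2","d2","ds2","e2","f2","fs2","g2","gs2","a2","as2","b2",
    "c3","cs3","d3","ds3","e3","f3","fs3","g3","gs3","a3","as3","b3",
    "c4","cs4","d4","ds4","e4","f4","fs4","g4","gs4","a4","as4","b4",
    "c5","cs5","d5","ds5","e5","f5","fs5","g5","gs5","a5","as5","b5",
    "c6","cs6","d6","ds6","e6","f6","fs6","g6","gs6","a6","as6","b6",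
    "c7","cs7","d7","ds7","e7","f7","fs7","g7","gs7","a7","as7","b7",
    "c8","cs8","d8","ds8","e8","f8","fs8","g8","gs8","a8","as8","b8",
    "c9","cs9","d9","ds9","e9","f9","fs9","g9","gs9","a9","as9","b9",
    "c10","cs10","d10","ds10","e10","f10","fs10","g10","gs10","a10","as10","b10"]

-- ===== PORT A =====
-- idx = next((i for i, x in enumerate(noteList) if x == noteName), -1)
def getChordInd (noteName : String) (mode : Int) : List Int :=
  let idx : Int :=
    match (PySem.List.enumerate noteList 0).find? (fun p => p.2 == noteName) with
    | some p => p.1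
    | none => -1
  if decide (2 ≤ PySem.Str.len noteName) && (PySem.Str.pyGet? noteName 1 == some 's') then
    if mode == 3 then [idx, idx+5, idx+8]
    else if mode == 4 then [idx, idx+5, idx+8, idx+11]
    else if mode == 5 then [idx, idx+5, idx+8, idx+11, idx+12]
    else []
  else
    if mode == 3 then [idx, idx+4, idx+7]
    else if mode == 4 then [idx, idx+4, idx+7, idx+11]
    else if mode == 5 then [idx, idx+4, idx+7, idx+11, idx+12]
    else []

-- ===== PORT B =====
-- _BASE = {'c':0,'d':2,'e':4,'f':5,'g':7,'a':9,'b':11}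
def pvBASE : PySem.Dict Char Int :=
  PySem.Dict.mk [('c',0),('d',2),('e',4),('f',5),('g',7),('a',9),('b',11)]
-- _OCTS = {str(o): o for o in range(11)}
def pvOCTS : PySem.Dict String Int :=
  PySem.Dict.mk [("0",0),("1",1),("2",2),("3",3),("4",4),("5",5),("6",6),("7",7),("8",8),("9",9),("10",10)]

-- def _noteIndex(noteName, sharp)
def noteIndexAlt (noteName : String) (sharp : Bool) : Int :=
  match PySem.Str.pyGet? noteName 0 with   -- `if not noteName: return -1` + `noteName[0]`
  | none => -1
  | some c0 =>
    match PySem.Dict.get? pvBASE c0 with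
    | none => -1
    | some b =>
      if sharp && !(['c','d','f','g','a'].contains c0) then -1
      else
        match PySem.Dict.get? pvOCTS (PySem.Str.slice noteName (some (if sharp then 2 else 1)) none) with
        | none => -1
        | some o => 12 * o + b + (if sharp then 1 else 0)

def getChordInd_alt (noteName : String) (mode : Int) : List Int :=
  if !(mode == 3) && !(mode == 4) && !(mode == 5) then []
  else
    let sharp := decide (2 ≤ PySem.Str.len noteName) && (PySem.Str.pyGet? noteName 1 == some 's')
    let step : Int := if sharp then 5 else 4
    let idx := noteIndexAlt noteName sharp
    let chord := [idx, idx + step, idx + step + 3]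
    let chord := if 4 ≤ mode then chord ++ [idx + 11] else chord
    if mode == 5 then chord ++ [idx + 12] else chord

-- ===== PRECONDITION & SPEC =====
def Spec_getChordInd (noteName : String) (mode : Int) (out : List Int) : Prop := out = getChordInd_alt noteName mode
instance (noteName : String) (mode : Int) (out : List Int) : Decidable (Spec_getChordInd noteName mode out) := by unfold Spec_getChordInd; infer_instance

-- ===== CLAIM (what is proved, stated in full; the proofs are below) =====
def Claim_equal_getChordInd : Prop := ∀ (noteName : String) (mode : Int), Dom_getChordInd noteName mode → Spec_getChordInd noteName mode (getChordInd noteName mode)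

-- ===== LEMMAS AND PROOFS =====

-- proof-side abbreviations for A's scan index and the sharp test
def scanIdx (s : String) : Int :=
  match PySem.List.index? noteList s with
  | some k => (k : Int)
  | none => -1

def sharpB (s : String) : Bool :=
  decide (2 ≤ PySem.Str.len s) && (PySem.Str.pyGet? s 1 == some 's')

-- A's enumerate/find? index scan equals list.index (both -1 on miss), for any start offset.
theorem find_enumerate_eq_index (xs : List String) (v : String) (s : Int) :
    (match (PySem.List.enumerate xs s).find? (fun p => p.2 == v) with
     | some p => p.1
     | none => (-1 : Int))
    = (match PySem.List.index? xs v with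
       | some k => s + (k : Int)
       | none => (-1 : Int)) := by
  induction xs generalizing s with
  | nil => simp [PySem.List.enumerate, PySem.List.index?]
  | cons x xs ih =>
    rw [PySem.List.enumerate_cons]
    by_cases hx : x = v
    · subst hx
      rw [PySem.List.index?_cons_self]
      simp [List.find?]
    · rw [PySem.List.index?_cons_of_ne xs hx]
      have hbeq : ((s, x).2 == v) = false := by simpa using hx
      simp only [List.find?, hbeq]
      rw [ih (s + 1)]
      cases PySem.List.index? xs v with
      | none => simp
      | some k => simp only [Option.map_some]; push_cast; ring

-- on the 132 table entries the arithmetic parse agrees with the scan (finite check)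
set_option maxRecDepth 10000 in
set_option maxHeartbeats 4000000 in
theorem scan_eq_alt_of_mem : ∀ s ∈ noteList, scanIdx s = noteIndexAlt s (sharpB s) := by
  intro s hs
  fin_cases hs <;> decide

set_option maxHeartbeats 2000000 in
theorem octs_keys {t : String} {o : Int} (h : PySem.Dict.get? pvOCTS t = some o) :
    t ∈ (["0","1","2","3","4","5","6","7","8","9","10"] : List String) := by
  simp only [pvOCTS, PySem.Dict.get?_mk_cons] at h
  split_ifs at h <;>
    first
      | (rename_i heq; simp only [beq_iff_eq] at heq; simp [← heq])
      | (exact absurd h (by simp [PySem.Dict.get?]))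

set_option maxHeartbeats 2000000 in
theorem base_keys {c : Char} {b : Int} (h : PySem.Dict.get? pvBASE c = some b) :
    c ∈ (['c','d','e','f','g','a','b'] : List Char) := by
  simp only [pvBASE, PySem.Dict.get?_mk_cons] at h
  split_ifs at h <;>
    first
      | (rename_i heq; simp only [beq_iff_eq] at heq; simp [← heq])
      | (exact absurd h (by simp [PySem.Dict.get?]))

theorem mem_noteList_of_toList (s : String) (h : s.toList ∈ noteList.map String.toList) :
    s ∈ noteList := by
  rcases List.mem_map.mp h with ⟨t, ht, hts⟩
  have : t = s := by
    have h2 := congrArg String.ofList hts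
    simpa using h2
  exact this ▸ ht

set_option maxRecDepth 10000 in
set_option maxHeartbeats 4000000 in
theorem sharp_mem : ∀ c ∈ (['c','d','f','g','a'] : List Char),
    ∀ t ∈ (["0","1","2","3","4","5","6","7","8","9","10"] : List String),
      (c :: 's' :: t.toList) ∈ noteList.map String.toList := by
  intro c hc t ht
  fin_cases hc <;> fin_cases ht <;> decide

set_option maxRecDepth 10000 in
set_option maxHeartbeats 4000000 in
theorem nat_mem : ∀ c ∈ (['c','d','e','f','g','a','b'] : List Char),
    ∀ t ∈ (["0","1","2","3","4","5","6","7","8","9","10"] : List String),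
      (c :: t.toList) ∈ noteList.map String.toList := by
  intro c hc t ht
  fin_cases hc <;> fin_cases ht <;> decide

-- outside the table the arithmetic parse also returns -1
theorem alt_eq_neg_one_of_not_mem (s : String) (h : s ∉ noteList) :
    noteIndexAlt s (sharpB s) = -1 := by
  by_contra hne
  apply h
  apply mem_noteList_of_toList
  unfold noteIndexAlt at hne
  split at hne
  · exact absurd rfl hne
  rename_i c0 hg0
  split at hne
  · exact absurd rfl hne
  rename_i b hb
  split at hne
  · exact absurd rfl hne
  rename_i hguard
  split at hne
  · exact absurd rfl hne
  rename_i o ho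
  have hc7 := base_keys hb
  have hg0' : PySem.List.pyGet? s.toList 0 = some c0 := by simpa using hg0
  by_cases hsh : sharpB s = true
  · -- sharp: s.toList = c0 :: 's' :: body
    rw [if_pos hsh] at ho
    have ht := octs_keys ho
    have hc5 : c0 ∈ (['c','d','f','g','a'] : List Char) := by
      simp only [hsh, Bool.true_and, Bool.not_eq_true', Bool.not_eq_false] at hguard
      simpa using hguard
    have hg1 : PySem.List.pyGet? s.toList 1 = some 's' := by
      have h1 : (PySem.Str.pyGet? s 1 == some 's') = true := (Bool.and_eq_true_iff.mp hsh).2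
      have h1' : PySem.Str.pyGet? s 1 = some 's' := by simpa using h1
      simpa using h1'
    have hbody : (PySem.Str.slice s (some 2) none).toList = s.toList.drop 2 := by
      have h2 : PySem.List.slice s.toList (some 2) none = s.toList.drop ((2:Int)).toNat :=
        PySem.List.slice_from s.toList (by norm_num)
      simpa using h2
    rcases hsl : s.toList with _ | ⟨a0, _ | ⟨a1, rest⟩⟩
    · rw [hsl] at hg0'; simp [PySem.List.pyGet?, PySem.List.pyIdx?] at hg0'
    · rw [hsl] at hg1; simp [PySem.List.pyGet?, PySem.List.pyIdx?] at hg1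
    · rw [hsl] at hg0' hg1 hbody
      have ha0 : a0 = c0 := by
        rw [PySem.List.pyGet?_zero_cons] at hg0'; exact Option.some.inj hg0'
      have ha1 : a1 = 's' := by
        have h1 : PySem.List.pyGet? (a0 :: a1 :: rest) ((1:Nat) : Int) = (a0 :: a1 :: rest)[(1:Nat)]? :=
          PySem.List.pyGet?_natCast _ _
        simp only [Nat.cast_one] at h1
        rw [h1] at hg1
        simpa using hg1
      have hrest : rest = (PySem.Str.slice s (some 2) none).toList := by rw [hbody]; rfl
      rw [ha0, ha1, hrest]
      exact sharp_mem c0 hc5 _ ht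
  · -- natural: s.toList = c0 :: body
    rw [if_neg hsh] at ho
    have ht := octs_keys ho
    have hbody : (PySem.Str.slice s (some 1) none).toList = s.toList.drop 1 := by
      have h2 : PySem.List.slice s.toList (some 1) none = s.toList.drop ((1:Int)).toNat :=
        PySem.List.slice_from s.toList (by norm_num)
      simpa using h2
    rcases hsl : s.toList with _ | ⟨a0, rest⟩
    · rw [hsl] at hg0'; simp [PySem.List.pyGet?, PySem.List.pyIdx?] at hg0'
    · rw [hsl] at hg0' hbody
      have ha0 : a0 = c0 := by
        rw [PySem.List.pyGet?_zero_cons] at hg0'; exact Option.some.inj hg0'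
      have hrest : rest = (PySem.Str.slice s (some 1) none).toList := by rw [hbody]; rfl
      rw [ha0, hrest]
      exact nat_mem c0 hc7 _ ht

theorem scan_eq_alt (s : String) : scanIdx s = noteIndexAlt s (sharpB s) := by
  by_cases h : s ∈ noteList
  · exact scan_eq_alt_of_mem s h
  · rw [alt_eq_neg_one_of_not_mem s h]
    unfold scanIdx
    rw [(PySem.List.index?_eq_none_iff noteList s).mpr h]

theorem getChordInd_eq (s : String) (m : Int) :
    getChordInd s m = getChordInd_alt s m := by
  unfold getChordInd getChordInd_alt
  have hidx : (match (PySem.List.enumerate noteList 0).find? (fun p => p.2 == s) with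
               | some p => p.1 | none => (-1:Int)) = noteIndexAlt s (sharpB s) := by
    rw [find_enumerate_eq_index noteList s 0]
    have hs := scan_eq_alt s
    unfold scanIdx at hs
    cases hI : PySem.List.index? noteList s <;> rw [hI] at hs <;> simpa using hs
  rw [hidx]
  have hB : (decide (2 ≤ PySem.Str.len s) && (PySem.Str.pyGet? s 1 == some 's')) = sharpB s := rfl
  rw [hB]
  by_cases hsh : sharpB s = true <;>
    simp only [hsh, Bool.false_eq_true, if_true, if_false] at * <;>
  · by_cases h3 : m = 3
    · subst h3; norm_num; ring
    · by_cases h4 : m = 4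
      · subst h4; norm_num; ring
      · by_cases h5 : m = 5
        · subst h5; norm_num; ring
        · simp [h3, h4, h5]

-- ===== VERDICT (by name: the statement is the Claim_ definition above) =====
theorem getChordInd_spec : Claim_equal_getChordInd := by
  intro s m _
  exact getChordInd_eq s m
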